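-- pv_equiv track=rewrite | github.com/userx14/trias_crawl | triasApi.py | combineAndFixStops
-- ===== SOURCE A (Python) =====
-- def combineAndFixStops(stopEvent):
--     allStopsUnfiltered = []
--     for callCat in ["PreviousCall", "ThisCall", "OnwardCall"]:
--         stopOrStopsList = stopEvent["StopEvent"].get(callCat)
--         if stopOrStopsList is not None:
--             allStopsUnfiltered.extend(stopOrStopsList)
--
--     #remove stops with identical stopPointRef, and fix indices
--     duplicateCount = 0
--     allStops = [allStopsUnfiltered[0]]
--     for stopIdx in range(1, len(allStopsUnfiltered)):
--         if allStopsUnfiltered[stopIdx]["CallAtStop"]["StopPointRef"] == allStops[-1]["CallAtStop"]["StopPointRef"]: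
--             duplicateCount += 1
--             continue
--         allStops.append(allStopsUnfiltered[stopIdx])
--         seqNr = int(allStops[-1]["CallAtStop"]["StopSeqNumber"])
--         allStops[-1]["CallAtStop"]["StopSeqNumber"] = str(seqNr - duplicateCount)
--     return allStops
-- ===== SOURCE B (Python) =====
-- # Two-phase re-implementation: split the combined stop list into maximal runs of
-- # equal StopPointRef, then emit each run's first stop, renumbering by the running
-- # total of dropped duplicates.  Like A it mutates the kept stops' nested dicts in
-- # place; equivalence is claimed for the return value.
-- def combineAndFixStops(stopEvent):
--     ev = stopEvent["StopEvent"]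
--     combined = []
--     for cat in ("PreviousCall", "ThisCall", "OnwardCall"):
--         got = ev.get(cat)
--         if got is not None:
--             combined = combined + got
--
--     # phase 1: maximal runs of consecutive equal StopPointRef
--     groups = []
--     i = 0
--     n = len(combined)
--     while i < n:
--         j = i + 1
--         while j < n and (combined[j]["CallAtStop"]["StopPointRef"]
--                          == combined[i]["CallAtStop"]["StopPointRef"]):
--             j += 1
--         groups.append(combined[i:j])
--         i = j
--
--     # phase 2: keep each run's first stop; the first kept stop is left untouched,
--     # every later kept stop is renumbered by the duplicates dropped before it
--     result = [groups[0][0]]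
--     dropped = len(groups[0]) - 1
--     for g in groups[1:]:
--         stop = g[0]
--         cas = stop["CallAtStop"]
--         cas["StopSeqNumber"] = str(int(cas["StopSeqNumber"]) - dropped)
--         result.append(stop)
--         dropped += len(g) - 1
--     return result
-- ===== Notes on version B (the rewrite author's own statement) =====
-- stated objective: alternative
-- what changed: A makes one pass counting duplicates one by one against the last kept stop; B first splits the combined list into maximal runs of equal StopPointRef and then emits each run's first stop, renumbering by per-run drop counts (len(run)-1) accumulated across runs.
import Mathlib
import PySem

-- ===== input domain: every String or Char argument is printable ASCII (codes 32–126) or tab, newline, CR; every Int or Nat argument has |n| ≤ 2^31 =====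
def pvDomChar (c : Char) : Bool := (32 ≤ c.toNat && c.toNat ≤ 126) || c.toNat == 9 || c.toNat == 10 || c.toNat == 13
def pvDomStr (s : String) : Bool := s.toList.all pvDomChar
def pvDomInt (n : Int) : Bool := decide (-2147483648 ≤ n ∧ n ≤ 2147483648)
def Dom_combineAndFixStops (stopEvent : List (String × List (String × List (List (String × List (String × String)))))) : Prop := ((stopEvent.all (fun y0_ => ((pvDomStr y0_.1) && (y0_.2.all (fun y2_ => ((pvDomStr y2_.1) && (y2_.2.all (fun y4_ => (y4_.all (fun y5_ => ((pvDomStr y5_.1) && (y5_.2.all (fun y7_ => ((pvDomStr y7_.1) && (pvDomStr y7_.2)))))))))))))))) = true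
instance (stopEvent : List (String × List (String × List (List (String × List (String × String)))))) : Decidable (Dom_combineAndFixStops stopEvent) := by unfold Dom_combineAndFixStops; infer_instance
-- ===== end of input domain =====

-- B replaces A's one-pass duplicate-counting scan by a two-phase run-split (maximal runs of
-- equal StopPointRef, then emit each run's head renumbered by accumulated per-run drops);
-- both Pythons mutate the kept stops' nested dicts in place: equivalence is about the return value.

abbrev pvStop := List (String × List (String × String))

-- shared field accessors (both Pythons read/write these fields identically)
def pvRef (s : pvStop) : String :=
  (PySem.Dict.mk ((PySem.Dict.mk s).getD "CallAtStop" [])).getD "StopPointRef" ""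

-- stop["CallAtStop"]["StopSeqNumber"] = str(int(...) - d)   (in-place dict overwrite)
def pvUpd (s : pvStop) (d : Int) : pvStop :=
  let cas := (PySem.Dict.mk s).getD "CallAtStop" []
  let seq := (PySem.Int.ofStr? ((PySem.Dict.mk cas).getD "StopSeqNumber" "")).getD 0
  ((PySem.Dict.mk s).insert "CallAtStop"
    ((PySem.Dict.mk cas).insert "StopSeqNumber" (PySem.Int.toStr (seq - d))).items).items

def pvCombined (stopEvent : List (String × List (String × List pvStop))) : List pvStop :=
  let ev := PySem.Dict.mk ((PySem.Dict.mk stopEvent).getD "StopEvent" [])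
  ["PreviousCall", "ThisCall", "OnwardCall"].foldl
    (fun acc c => acc ++ ((ev.get? c).getD [])) []

-- ===== PORT A =====
-- A's single pass: compare each stop to the last kept one (head of the reversed accumulator)
def pvALoop (d : Int) (acc : List pvStop) (l : List pvStop) : List pvStop :=
  match l with
  | [] => acc.reverse
  | s :: t =>
    if pvRef s == pvRef (acc.headD []) then pvALoop (d + 1) acc t
    else pvALoop d (pvUpd s d :: acc) t

def combineAndFixStops (stopEvent : List (String × List (String × List (List (String × List (String × String)))))) : List (List (String × List (String × String))) :=
  match pvCombined stopEvent with
  | [] => []          -- Python raises IndexError here; excluded by Pre_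
  | s0 :: rest => pvALoop 0 [s0] rest

-- ===== PORT B =====
-- phase 1: maximal runs of consecutive equal StopPointRef
def pvRuns (l : List pvStop) : List (List pvStop) :=
  match l with
  | [] => []
  | s :: t =>
    (s :: t.takeWhile (fun x => pvRef x == pvRef s)) :: pvRuns (t.dropWhile (fun x => pvRef x == pvRef s))
termination_by l.length
decreasing_by
  simpa using Nat.lt_succ_of_le (t.length_dropWhile_le _)

-- phase 2: keep each run's head, renumbered by the duplicates dropped before it
def pvBLoop (dropped : Int) (gs : List (List pvStop)) : List pvStop :=
  match gs with
  | [] => []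
  | g :: t => pvUpd (g.headD []) dropped :: pvBLoop (dropped + ((g.length : Int) - 1)) t

def combineAndFixStops_alt (stopEvent : List (String × List (String × List (List (String × List (String × String)))))) : List (List (String × List (String × String))) :=
  match pvRuns (pvCombined stopEvent) with
  | [] => []          -- Python B raises IndexError here; excluded by Pre_
  | g :: gs => g.headD [] :: pvBLoop (((g.length : Int)) - 1) gs

-- ===== PRECONDITION & SPEC =====
-- Pre_ excludes exactly the inputs where the Python raises: missing "StopEvent" key, empty
-- combined stop list, missing CallAtStop/StopPointRef keys when there are at least two stops,
-- and an absent or unparsable StopSeqNumber on a kept non-initial stop (a stop is kept exactly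
-- when its StopPointRef differs from its predecessor's).
def Pre_combineAndFixStops (stopEvent : List (String × List (String × List (List (String × List (String × String)))))) : Prop :=
  ((PySem.Dict.mk stopEvent).get? "StopEvent").isSome ∧
  pvCombined stopEvent ≠ [] ∧
  (2 ≤ (pvCombined stopEvent).length →
    ∀ s ∈ pvCombined stopEvent,
      ((PySem.Dict.mk s).get? "CallAtStop").isSome ∧
      ((PySem.Dict.mk ((PySem.Dict.mk s).getD "CallAtStop" [])).get? "StopPointRef").isSome) ∧
  ∀ p ∈ (pvCombined stopEvent).zip (pvCombined stopEvent).tail,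
    pvRef p.2 ≠ pvRef p.1 →
      (PySem.Int.ofStr? ((PySem.Dict.mk ((PySem.Dict.mk p.2).getD "CallAtStop" [])).getD "StopSeqNumber" "")).isSome
instance (stopEvent : List (String × List (String × List (List (String × List (String × String)))))) : Decidable (Pre_combineAndFixStops stopEvent) := by
  unfold Pre_combineAndFixStops; infer_instance

def pvWitness_combineAndFixStops : (List (String × List (String × List (List (String × List (String × String)))))) :=
  [("StopEvent", [("ThisCall", [[("CallAtStop", [("StopPointRef", "A"), ("StopSeqNumber", "1")])]])])]

def Spec_combineAndFixStops (stopEvent : List (String × List (String × List (List (String × List (String × String)))))) (out : List (List (String × List (String × String)))) : Prop := out = combineAndFixStops_alt stopEvent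
instance (stopEvent : List (String × List (String × List (List (String × List (String × String)))))) (out : List (List (String × List (String × String)))) : Decidable (Spec_combineAndFixStops stopEvent out) := by unfold Spec_combineAndFixStops; infer_instance

-- ===== CLAIM (what is proved, stated in full; the proofs are below) =====
def Claim_equal_combineAndFixStops : Prop := ∀ (stopEvent : List (String × List (String × List (List (String × List (String × String)))))), Dom_combineAndFixStops stopEvent → Pre_combineAndFixStops stopEvent → Spec_combineAndFixStops stopEvent (combineAndFixStops stopEvent)

-- ===== LEMMAS AND PROOFS =====

-- updating StopSeqNumber leaves StopPointRef unchanged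
lemma pvRef_pvUpd (s : pvStop) (d : Int) : pvRef (pvUpd s d) = pvRef s := by
  simp only [pvRef, pvUpd]
  rw [show ∀ (d : PySem.Dict String (List (String × String))), PySem.Dict.mk d.items = d from fun _ => rfl]
  rw [PySem.Dict.getD_insert_self]
  rw [show ∀ (d : PySem.Dict String String), PySem.Dict.mk d.items = d from fun _ => rfl]
  rw [PySem.Dict.getD_insert]; simp

-- proof-side bridge: A's scan expressed over runs, carrying the last kept ref
def pvBRest (r : String) (d : Int) (gs : List (List pvStop)) : List pvStop :=
  match gs with
  | [] => []
  | g :: t =>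
    if pvRef (g.headD []) == r then pvBRest r (d + (g.length : Int)) t
    else pvUpd (g.headD []) d :: pvBRest (pvRef (g.headD [])) (d + ((g.length : Int) - 1)) t

lemma pvBRest_skip (t : List pvStop) (r : String) (d : Int) :
    pvBRest r d (pvRuns t)
      = pvBRest r (d + ((t.takeWhile (fun x => pvRef x == r)).length : Int))
          (pvRuns (t.dropWhile (fun x => pvRef x == r))) := by
  cases t with
  | nil => simp [pvRuns, pvBRest]
  | cons x u =>
    by_cases h : pvRef x == r
    · have hr : pvRef x = r := by simpa using h
      subst hr
      rw [pvRuns]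
      simp [pvBRest]
    · simp [h]

lemma pvBRest_eq_pvBLoop (l : List pvStop) (r : String) (d : Int)
    (h : l = [] ∨ ∃ x t, l = x :: t ∧ pvRef x ≠ r) :
    pvBRest r d (pvRuns l) = pvBLoop d (pvRuns l) := by
  induction hn : l.length using Nat.strong_induction_on generalizing l r d with
  | _ n ih =>
    rcases h with h | ⟨x, t, rfl, hx⟩
    · subst h; simp [pvRuns, pvBRest, pvBLoop]
    · rw [pvRuns, pvBRest, pvBLoop]
      have hbx : (pvRef ((x :: t.takeWhile (fun y => pvRef y == pvRef x)).headD []) == r) = false := by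
        simpa using hx
      rw [hbx]
      simp only [Bool.false_eq_true, if_false, List.headD_cons]
      congr 1
      have hlt : (t.dropWhile (fun y => pvRef y == pvRef x)).length < n := by
        subst hn
        simpa using Nat.lt_succ_of_le (t.length_dropWhile_le _)
      refine ih _ hlt _ _ _ ?_ rfl
      cases hdw : t.dropWhile (fun y => pvRef y == pvRef x) with
      | nil => exact Or.inl rfl
      | cons y ys =>
        refine Or.inr ⟨y, ys, rfl, ?_⟩
        have h2 : t.dropWhile (fun y => pvRef y == pvRef x) ≠ [] := by simp [hdw]
        have h3 := List.head_dropWhile_not (l := t) (p := fun y => pvRef y == pvRef x) h2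
        have h4 : (t.dropWhile (fun y => pvRef y == pvRef x)).head h2 = y := by simp [hdw]
        rw [h4] at h3
        simpa using h3

lemma pvALoop_eq (l : List pvStop) (a : pvStop) (acc : List pvStop) (d : Int) :
    pvALoop d (a :: acc) l = (a :: acc).reverse ++ pvBRest (pvRef a) d (pvRuns l) := by
  induction l generalizing a acc d with
  | nil => simp [pvALoop, pvRuns, pvBRest]
  | cons s t ih =>
    rw [pvALoop]
    simp only [List.headD_cons]
    by_cases h : pvRef s == pvRef a
    · have hr : pvRef s = pvRef a := by simpa using h
      rw [if_pos h, ih]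
      rw [pvRuns, pvBRest]
      simp only [List.headD_cons, hr, BEq.rfl, if_true]
      rw [pvBRest_skip (r := pvRef a)]
      congr 2
      simp only [List.length_cons]
      push_cast
      ring
    · rw [if_neg (by simp [h])]
      rw [ih]
      rw [pvRuns, pvBRest]
      have hbx : (pvRef ((s :: t.takeWhile (fun y => pvRef y == pvRef s)).headD []) == pvRef a) = false := by
        simpa using h
      rw [hbx]
      simp only [Bool.false_eq_true, if_false, pvRef_pvUpd, List.reverse_cons, List.append_assoc,
        List.cons_append, List.nil_append]
      congr 2
      rw [pvBRest_skip (r := pvRef s)]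
      congr 2
      simp only [List.length_cons]
      push_cast
      ring

-- ===== VERDICT (by name: the statement is the Claim_ definition above) =====
theorem combineAndFixStops_spec : Claim_equal_combineAndFixStops := by
  intro stopEvent _hdom _hpre
  unfold Spec_combineAndFixStops combineAndFixStops combineAndFixStops_alt
  cases hc : pvCombined stopEvent with
  | nil => rw [pvRuns]
  | cons s0 rest =>
    rw [pvRuns]
    dsimp only
    rw [pvALoop_eq]
    simp only [List.reverse_cons, List.reverse_nil, List.nil_append, List.cons_append,
      List.headD_cons]
    congr 1
    rw [pvBRest_skip (r := pvRef s0)]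
    rw [pvBRest_eq_pvBLoop]
    · congr 1
      simp only [List.length_cons]
      push_cast
      ring
    · cases hdw : rest.dropWhile (fun y => pvRef y == pvRef s0) with
      | nil => exact Or.inl rfl
      | cons y ys =>
        refine Or.inr ⟨y, ys, rfl, ?_⟩
        have h2 : rest.dropWhile (fun y => pvRef y == pvRef s0) ≠ [] := by simp [hdw]
        have h3 := List.head_dropWhile_not (l := rest) (p := fun y => pvRef y == pvRef s0) h2
        have h4 : (rest.dropWhile (fun y => pvRef y == pvRef s0)).head h2 = y := by simp [hdw]
        rw [h4] at h3
        simpa using h3
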